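-- pv_equiv track=rewrite | github.com/imac28lab/RRM_Verano_2024_T1 | codigo_base/.ipynb_checkpoints/chema-checkpoint.py | fa_grouped
-- ===== SOURCE A (Python) =====
-- def fa_grouped(datos, lim_inf, lim_sup):
--
--     fa = [0] * len(lim_inf)
--
--     clases = [0] * len(lim_inf)
--
--     for i in range(len(lim_inf)):
--         clases[i] = i + 1
--
--     for dato in datos:
--         for j in range(0, len(lim_inf)):
--             # Para crear la otra distribucion se cambian las contidiones
--             if j == len(lim_inf)-1:
--                 if lim_inf[j] <= dato <= lim_sup[j]:
--                     fa[j] += 1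
--                     break
--             else:
--                 if lim_inf[j] <= dato < lim_sup[j]:
--                     fa[j] += 1
--                     break
--     return fa, clases
-- ===== SOURCE B (Python) =====
-- def fa_grouped(datos, lim_inf, lim_sup):
--     k = len(lim_inf)
--     fa = []
--     remaining = list(datos)
--     for j in range(k):
--         lo, hi = lim_inf[j], lim_sup[j]
--         if j == k - 1:
--             pred = lambda d: lo <= d <= hi
--         else:
--             pred = lambda d: lo <= d < hi
--         fa.append(len([d for d in remaining if pred(d)]))
--         remaining = [d for d in remaining if not pred(d)]
--     return fa, list(range(1, k + 1))
-- ===== Notes on version B (the rewrite author's own statement) =====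
-- stated objective: alternative
-- what changed: B loops over the classes instead of over the data: at each class it counts the still-unassigned data falling in that class with a comprehension and partitions them out of the remaining pool, rather than A's per-datum inner scan over all classes with a break.
-- outside the precondition, e.g. on fa_grouped([5], [10], []): A returns ([0], [1]), B raises IndexError
import Mathlib
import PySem

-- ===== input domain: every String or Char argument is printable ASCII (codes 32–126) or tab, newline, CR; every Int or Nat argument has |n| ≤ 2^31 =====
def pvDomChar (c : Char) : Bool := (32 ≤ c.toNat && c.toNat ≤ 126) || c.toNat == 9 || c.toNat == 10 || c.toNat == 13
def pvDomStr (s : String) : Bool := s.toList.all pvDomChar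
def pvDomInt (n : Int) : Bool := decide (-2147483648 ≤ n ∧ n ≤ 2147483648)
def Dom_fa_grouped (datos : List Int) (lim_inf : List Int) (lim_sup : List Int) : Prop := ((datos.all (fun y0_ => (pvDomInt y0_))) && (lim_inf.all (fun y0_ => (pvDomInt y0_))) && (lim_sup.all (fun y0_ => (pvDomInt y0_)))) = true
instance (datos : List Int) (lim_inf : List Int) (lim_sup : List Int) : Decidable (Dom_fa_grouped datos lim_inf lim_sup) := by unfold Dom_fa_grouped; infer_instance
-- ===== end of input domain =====

-- B loops over classes, counting and removing the matching data from a shrinking pool,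
-- instead of A's per-datum scan over the classes with a break (alternative decomposition).

-- ===== PORT A =====
-- inner 'for j in range(0, len(lim_inf))' loop of A, with the break as a return
def loopA (li ls : List Int) (d : Int) (fa : List Int) (j : Nat) : List Int :=
  if _h : j < li.length then
    if j = li.length - 1 then
      if li.getD j 0 ≤ d ∧ d ≤ ls.getD j 0 then fa.set j (fa.getD j 0 + 1)
      else loopA li ls d fa (j + 1)
    else
      if li.getD j 0 ≤ d ∧ d < ls.getD j 0 then fa.set j (fa.getD j 0 + 1)
      else loopA li ls d fa (j + 1)
  else fa
termination_by li.length - j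

def fa_grouped (datos : List Int) (lim_inf : List Int) (lim_sup : List Int) : List Int × List Int :=
  let clases := (List.range lim_inf.length).foldl
      (fun cl i => cl.set i ((i : Int) + 1)) (List.replicate lim_inf.length 0)
  let fa := datos.foldl (fun fa d => loopA lim_inf lim_sup d fa 0)
      (List.replicate lim_inf.length 0)
  (fa, clases)

-- ===== PORT B =====
-- the class-j membership test of B ('pred')
def predB (li ls : List Int) (j : Nat) (d : Int) : Bool :=
  if j = li.length - 1 then decide (li.getD j 0 ≤ d) && decide (d ≤ ls.getD j 0)
  else decide (li.getD j 0 ≤ d) && decide (d < ls.getD j 0)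

-- B's 'for j in range(k)' loop over a shrinking pool 'remaining'
def loopB (li ls : List Int) (rem : List Int) (j : Nat) : List Int :=
  if _h : j < li.length then
    ((rem.filter (predB li ls j)).length : Int)
      :: loopB li ls (rem.filter (fun d => !(predB li ls j d))) (j + 1)
  else []
termination_by li.length - j

def fa_grouped_alt (datos : List Int) (lim_inf : List Int) (lim_sup : List Int) : List Int × List Int :=
  (loopB lim_inf lim_sup datos 0, (List.range lim_inf.length).map (fun i : Nat => (i : Int) + 1))

-- ===== PRECONDITION & SPEC =====
-- Pre_ excludes inputs where lim_sup is shorter than lim_inf: there A raises IndexError as soon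
-- as some datum reaches a class without an upper bound (it returns only by accident of
-- short-circuit evaluation when every datum is stopped by a lower bound first).
def Pre_fa_grouped (datos : List Int) (lim_inf : List Int) (lim_sup : List Int) : Prop :=
  lim_inf.length ≤ lim_sup.length
instance (datos : List Int) (lim_inf : List Int) (lim_sup : List Int) : Decidable (Pre_fa_grouped datos lim_inf lim_sup) := by unfold Pre_fa_grouped; infer_instance

def pvWitness_fa_grouped : List Int × List Int × List Int := ([1, 5, 9, 5], [0, 4, 8], [4, 8, 12])

def Spec_fa_grouped (datos : List Int) (lim_inf : List Int) (lim_sup : List Int) (out : List Int × List Int) : Prop := out = fa_grouped_alt datos lim_inf lim_sup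
instance (datos : List Int) (lim_inf : List Int) (lim_sup : List Int) (out : List Int × List Int) : Decidable (Spec_fa_grouped datos lim_inf lim_sup out) := by unfold Spec_fa_grouped; infer_instance

-- ===== CLAIM (what is proved, stated in full; the proofs are below) =====
def Claim_equal_fa_grouped : Prop := ∀ (datos : List Int) (lim_inf : List Int) (lim_sup : List Int), Dom_fa_grouped datos lim_inf lim_sup → Pre_fa_grouped datos lim_inf lim_sup → Spec_fa_grouped datos lim_inf lim_sup (fa_grouped datos lim_inf lim_sup)

-- ===== LEMMAS AND PROOFS =====

-- index of the first class containing d, searching from class j upward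
def fmAux (li ls : List Int) (j : Nat) (d : Int) : Option Nat :=
  if _h : j < li.length then
    if predB li ls j d then some j else fmAux li ls (j + 1) d
  else none
termination_by li.length - j

theorem fmAux_ge (li ls : List Int) (j : Nat) (d : Int) (i : Nat)
    (h : fmAux li ls j d = some i) : j ≤ i := by
  fun_induction fmAux li ls j d with
  | case1 j hj hp => simp at h; omega
  | case2 j hj hp ih => have := ih h; omega
  | case3 j hj => simp at h

theorem loopA_predB (li ls : List Int) (d : Int) (fa : List Int) (j : Nat) :
    loopA li ls d fa j =
      if j < li.length then
        (if predB li ls j d then fa.set j (fa.getD j 0 + 1) else loopA li ls d fa (j + 1))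
      else fa := by
  rw [loopA]
  unfold predB
  by_cases hj : j < li.length
  · rw [dif_pos hj, if_pos hj]
    by_cases hl : j = li.length - 1
    · rw [if_pos hl, if_pos hl]
      simp only [Bool.and_eq_true, decide_eq_true_eq]
    · rw [if_neg hl, if_neg hl]
      simp only [Bool.and_eq_true, decide_eq_true_eq]
  · rw [dif_neg hj, if_neg hj]

theorem fmAux_true (li ls : List Int) (j : Nat) (d : Int) (hj : j < li.length)
    (hp : predB li ls j d = true) : fmAux li ls j d = some j := by
  rw [fmAux]; simp [hj, hp]

theorem fmAux_false (li ls : List Int) (j : Nat) (d : Int) (hj : j < li.length)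
    (hp : ¬ predB li ls j d = true) : fmAux li ls j d = fmAux li ls (j + 1) d := by
  rw [fmAux]; simp [hj, hp]

theorem loopA_eq (li ls : List Int) (d : Int) (fa : List Int) (j : Nat) :
    loopA li ls d fa j =
      match fmAux li ls j d with
      | some i => fa.set i (fa.getD i 0 + 1)
      | none => fa := by
  fun_induction fmAux li ls j d with
  | case1 j hj hp =>
    rw [loopA_predB, if_pos hj, if_pos hp]
  | case2 j hj hp ih =>
    rw [loopA_predB, if_pos hj, if_neg hp]
    exact ih
  | case3 j hj =>
    rw [loopA_predB, if_neg hj]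

theorem fmAux_some_self (li ls : List Int) (j : Nat) (d : Int) (hj : j < li.length) :
    (fmAux li ls j d == some j) = predB li ls j d := by
  cases hp : predB li ls j d with
  | true => rw [fmAux_true li ls j d hj hp]; simp
  | false =>
    rw [fmAux_false li ls j d hj (by simp [hp])]
    cases h2 : fmAux li ls (j + 1) d with
    | none => simp
    | some i =>
      have := fmAux_ge li ls (j + 1) d i h2
      simp
      omega

theorem fmAux_shift (li ls : List Int) (j : Nat) (d : Int) (i : Nat) (hj : j < li.length)
    (hji : j < i) :
    (fmAux li ls j d == some i) = (!predB li ls j d && (fmAux li ls (j + 1) d == some i)) := by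
  cases hp : predB li ls j d with
  | true =>
    rw [fmAux_true li ls j d hj hp]
    simp
    omega
  | false =>
    rw [fmAux_false li ls j d hj (by simp [hp])]
    simp

theorem loopB_eq (li ls : List Int) (j : Nat) (rem : List Int) :
    loopB li ls rem j = (List.range' j (li.length - j)).map
      (fun i => ((rem.filter (fun d => fmAux li ls j d == some i)).length : Int)) := by
  fun_induction loopB li ls rem j with
  | case1 rem j hj ih =>
    have hk : li.length - j = (li.length - (j + 1)) + 1 := by omega
    rw [hk, List.range'_succ, List.map_cons]
    congr 1
    · congr 1
      apply congrArg
      apply List.filter_congr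
      intro d _
      exact (fmAux_some_self li ls j d hj).symm
    · simp only [List.unattach_filter, List.unattach_attach] at ih
      rw [ih]
      apply List.map_congr_left
      intro i hi
      have hji : j < i := by
        have := (List.mem_range' ).mp hi
        omega
      congr 1
      apply congrArg
      rw [List.filter_filter]
      apply List.filter_congr
      intro d _
      rw [Bool.and_comm]
      exact (fmAux_shift li ls j d i hj hji).symm
  | case2 rem j hj =>
    have hk : li.length - j = 0 := by omega
    simp [hk]

-- the datos fold of A, pointwise
theorem foldA_length (li ls : List Int) (datos : List Int) (fa : List Int) :
    (datos.foldl (fun fa d => loopA li ls d fa 0) fa).length = fa.length := by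
  induction datos generalizing fa with
  | nil => rfl
  | cons d ds ih =>
    rw [List.foldl_cons, ih]
    rw [loopA_eq]
    cases fmAux li ls 0 d <;> simp

theorem foldA_getD (li ls : List Int) (datos : List Int) (fa : List Int) (i : Nat)
    (hi : i < fa.length) :
    (datos.foldl (fun fa d => loopA li ls d fa 0) fa).getD i 0
      = fa.getD i 0 + ((datos.filter (fun d => fmAux li ls 0 d == some i)).length : Int) := by
  induction datos generalizing fa with
  | nil => simp
  | cons d ds ih =>
    rw [List.foldl_cons, List.filter_cons,
      ih _ (by rw [loopA_eq]; cases fmAux li ls 0 d <;> simp [hi] <;> omega),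
      loopA_eq]
    cases h : fmAux li ls 0 d with
    | none => simp
    | some m =>
      by_cases him : m = i
      · subst him
        simp only [beq_self_eq_true, if_pos, List.length_cons, reduceIte]
        rw [List.getD_eq_getElem?_getD, List.getElem?_set_self hi, Option.getD_some]
        push_cast
        ring
      · rw [if_neg (by simp [him])]
        rw [List.getD_eq_getElem?_getD, List.getElem?_set_ne (by omega), ← List.getD_eq_getElem?_getD]

theorem foldl_set_length (l : List Nat) (cl : List Int) :
    (l.foldl (fun c n => c.set n ((n : Int) + 1)) cl).length = cl.length := by
  induction l generalizing cl with
  | nil => rfl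
  | cons a l ih => rw [List.foldl_cons, ih]; simp

theorem foldl_set_getD (l : List Nat) (cl : List Int) (i : Nat) :
    (l.foldl (fun c n => c.set n ((n : Int) + 1)) cl).getD i 0
      = if i ∈ l ∧ i < cl.length then (i : Int) + 1 else cl.getD i 0 := by
  induction l generalizing cl with
  | nil => simp
  | cons a l ih =>
    rw [List.foldl_cons, ih]
    simp only [List.length_set, List.mem_cons]
    by_cases hil : i ∈ l
    · simp only [hil, or_true, true_and]
      split_ifs with h
      · rfl
      · rw [List.getD_eq_getElem?_getD, List.getD_eq_getElem?_getD,
          List.getElem?_eq_none (by simp; omega), List.getElem?_eq_none (by omega)]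
    · by_cases hia : i = a
      · subst hia
        by_cases hlen : i < cl.length
        · rw [List.getD_eq_getElem?_getD, List.getElem?_set_self hlen, Option.getD_some]
          simp [hil, hlen]
        · simp only [hil, or_false, hlen, and_false, if_neg, reduceIte]
          rw [List.set_eq_of_length_le (by omega)]
      · simp only [hil, hia, false_or, false_and, reduceIte]
        rw [List.getD_eq_getElem?_getD, List.getElem?_set_ne (by omega), ← List.getD_eq_getElem?_getD]

-- A's clases loop builds [1, …, k]
theorem clases_eq (k : Nat) :
    (List.range k).foldl (fun cl i => cl.set i ((i : Int) + 1)) (List.replicate k 0)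
      = (List.range k).map (fun i : Nat => (i : Int) + 1) := by
  apply List.ext_getElem
  · rw [foldl_set_length]; simp
  · intro i h1 h2
    have hk : i < k := by
      have := h1
      rw [foldl_set_length] at this
      simpa using this
    rw [List.getElem_map, ← List.getD_eq_getElem (d := 0) _ h1, foldl_set_getD]
    simp [hk]

-- ===== VERDICT (by name: the statement is the Claim_ definition above) =====
theorem fa_grouped_spec : Claim_equal_fa_grouped := by
  intro datos li ls _ _
  show fa_grouped datos li ls = fa_grouped_alt datos li ls
  unfold fa_grouped fa_grouped_alt
  refine Prod.ext ?_ ?_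
  · rw [loopB_eq]
    apply List.ext_getElem
    · rw [foldA_length, List.length_replicate, List.length_map, List.length_range']
      omega
    · intro i h1 h2
      have hk : i < li.length := by rw [foldA_length, List.length_replicate] at h1; exact h1
      rw [← List.getD_eq_getElem (d := 0) _ h1, foldA_getD _ _ _ _ _ (by simp [hk]),
        List.getElem_map, List.getElem_range']
      simp [List.getD_eq_getElem?_getD, List.getElem?_replicate, hk]
  · exact clases_eq li.length
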